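-- pv_equiv track=rewrite | github.com/jihun92/algorithm | auther/04.same_name.py | couple
-- ===== SOURCE A (Python) =====
-- def couple(a):
--     n = len(a)
--     rs = set()
--     for i in range(n):
--         for j in range(n):
--             if a[i] != a[j]:
--                 rs.add("%s - %s" %(a[i], a[j]))
--     return rs
-- ===== SOURCE B (Python) =====
-- def couple(a):
--     # Deduplicate to distinct values (first-occurrence order), then walk the
--     # d*d pair grid with a SINGLE index loop, decoding row/column by divmod;
--     # each off-diagonal key is generated exactly once, so no membership
--     # testing or set insertion logic is needed while building.
--     d = list(dict.fromkeys(a))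
--     m = len(d)
--     out = []
--     for k in range(m * m):
--         u = d[k // m]
--         v = d[k % m]
--         if u != v:
--             out.append("%s - %s" % (u, v))
--     return set(out)
-- ===== Notes on version B (the rewrite author's own statement) =====
-- stated objective: alternative
-- what changed: B deduplicates once (dict.fromkeys), then generates each off-diagonal key exactly once by a single flat loop over the d*d pair grid, decoding row/column with divmod and plain list appends - no per-candidate set-membership insertion and no nested loops - versus A's nested index loops inserting every candidate into a set.
import Mathlib
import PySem

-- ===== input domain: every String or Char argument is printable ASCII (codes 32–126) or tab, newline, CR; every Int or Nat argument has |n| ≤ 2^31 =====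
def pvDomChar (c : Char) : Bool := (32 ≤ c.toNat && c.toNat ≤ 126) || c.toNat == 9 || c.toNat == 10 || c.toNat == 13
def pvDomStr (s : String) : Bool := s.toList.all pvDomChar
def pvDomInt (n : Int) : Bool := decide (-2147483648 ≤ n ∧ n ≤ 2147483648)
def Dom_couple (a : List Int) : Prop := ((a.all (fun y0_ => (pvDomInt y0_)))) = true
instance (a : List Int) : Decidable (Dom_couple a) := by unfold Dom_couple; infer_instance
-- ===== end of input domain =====

-- B deduplicates first and then generates each off-diagonal key exactly once by one flat
-- loop over the d*d pair grid (divmod index decoding, list appends) instead of A's nested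
-- index loops with per-candidate set insertion (alternative algorithm, same result).

-- shared formatting helper: "%s - %s" % (x, y)
def pvKey (x y : Int) : String := PySem.Int.toStr x ++ " - " ++ PySem.Int.toStr y

-- ===== PORT A =====
def couple (a : List Int) : List String :=
  let n : Int := PySem.List.len a
  (PySem.List.pyRange 0 n 1).foldl (fun rs i =>
    (PySem.List.pyRange 0 n 1).foldl (fun rs j =>
      if PySem.List.pyGetD a i 0 ≠ PySem.List.pyGetD a j 0 then
        PySem.Set.add rs (pvKey (PySem.List.pyGetD a i 0) (PySem.List.pyGetD a j 0))
      else rs) rs)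
    PySem.Set.empty

-- ===== PORT B =====
def couple_alt (a : List Int) : List String :=
  let d := PySem.List.dedup a
  let m : Int := PySem.List.len d
  let out := (PySem.List.pyRange 0 (m * m) 1).foldl (fun out k =>
    let u := PySem.List.pyGetD d (PySem.Int.floordiv k m) 0
    let v := PySem.List.pyGetD d (PySem.Int.mod k m) 0
    if u ≠ v then out ++ [pvKey u v] else out) []
  PySem.Set.ofList out

-- ===== PRECONDITION & SPEC =====
def Spec_couple (a : List Int) (out : List String) : Prop := out = couple_alt a
instance (a : List Int) (out : List String) : Decidable (Spec_couple a out) := by unfold Spec_couple; infer_instance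

-- ===== CLAIM (what is proved, stated in full; the proofs are below) =====
def Claim_equal_couple : Prop := ∀ (a : List Int), Dom_couple a → Spec_couple a (couple a)

-- ===== LEMMAS AND PROOFS =====

-- the list of keys produced for a fixed left value x against the whole list l
def pvInner (l : List Int) (x : Int) : List String :=
  l.flatMap (fun y => if x ≠ y then [pvKey x y] else [])

-- A-SIDE LEMMAS ------------------------------------------------------------

-- the conditional-add inner loop is an update by pvInner
theorem pvCondfold (x : Int) : ∀ (l : List Int) (s : PySem.Set String),
    l.foldl (fun rs y => if x ≠ y then PySem.Set.add rs (pvKey x y) else rs) s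
      = PySem.Set.update s (pvInner l x) := by
  intro l
  induction l with
  | nil => intro s; simp [pvInner, PySem.Set.update]
  | cons y t ih =>
    intro s
    simp only [List.foldl_cons, pvInner, List.flatMap_cons]
    by_cases h : x = y
    · rw [if_neg (fun hc => hc h), if_neg (fun hc => hc h), List.nil_append]
      exact ih s
    · rw [if_pos h, if_pos h, List.singleton_append, PySem.Set.update_cons]
      exact ih (PySem.Set.add s (pvKey x y))

-- chaining updates over a list is one update by the flattened list
theorem pvFoldlUpdate (h : Int → List String) : ∀ (l : List Int) (s : PySem.Set String),
    l.foldl (fun s x => PySem.Set.update s (h x)) s = PySem.Set.update s (l.flatMap h) := by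
  intro l
  induction l with
  | nil => intro s; simp [PySem.Set.update]
  | cons x t ih =>
    intro s
    simp only [List.foldl_cons, List.flatMap_cons, ih, PySem.Set.update_append]

-- an update by keys already present does nothing
theorem pvUpdateAbsorb (s : PySem.Set String) (ks : List String)
    (h : ∀ k ∈ ks, k ∈ s) : PySem.Set.update s ks = s := by
  rw [PySem.Set.update_eq_append_filter]
  have hnil : List.filter (fun y => !(PySem.Set.contains s y)) (PySem.Set.ofList ks) = [] := by
    apply List.filter_eq_nil_iff.mpr
    intro k hk
    have hm : k ∈ s := h k ((PySem.Set.mem_ofList ks k).mp hk)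
    simp [hm]
  rw [hnil, List.append_nil]

-- CORE: a set built from a flattened list is unchanged if the outer list is deduplicated first
theorem pvCore (h : Int → List String) : ∀ (l : List Int),
    PySem.Set.ofList (l.flatMap h)
      = PySem.Set.ofList ((PySem.List.dedup l).flatMap h) := by
  intro l
  induction l using List.reverseRecOn with
  | nil => simp
  | append_singleton t x ih =>
    by_cases hx : x ∈ t
    · have hd : PySem.List.dedup (t ++ [x]) = PySem.List.dedup t := by
        simp only [PySem.List.dedup_eq_ofList, PySem.Set.ofList_append_singleton]
        exact PySem.Set.add_of_mem (by simpa [PySem.Set.mem_ofList] using hx)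
      rw [hd, List.flatMap_append, PySem.Set.ofList_append, ← ih]
      apply pvUpdateAbsorb
      intro k hk
      have hk' : k ∈ h x := by simpa using hk
      have : k ∈ t.flatMap h := List.mem_flatMap.mpr ⟨x, hx, hk'⟩
      simpa [PySem.Set.mem_ofList] using this
    · have hd : PySem.List.dedup (t ++ [x]) = PySem.List.dedup t ++ [x] := by
        simp only [PySem.List.dedup_eq_ofList, PySem.Set.ofList_append_singleton]
        exact PySem.Set.add_of_not_mem (by simpa [PySem.Set.mem_ofList] using hx)
      rw [hd, List.flatMap_append, List.flatMap_append, PySem.Set.ofList_append,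
        PySem.Set.ofList_append, ih]

-- two updates by lists with the same ofList are equal
theorem pvUpdateCongr (s : PySem.Set String) (ks ks' : List String)
    (h : PySem.Set.ofList ks = PySem.Set.ofList ks') :
    PySem.Set.update s ks = PySem.Set.update s ks' := by
  rw [PySem.Set.update_eq_append_filter, PySem.Set.update_eq_append_filter, h]

-- A's value is the set of the row-by-row pairing over the deduplicated list
theorem pvAchar (a : List Int) :
    couple a = PySem.Set.ofList
      ((PySem.List.dedup a).flatMap (pvInner (PySem.List.dedup a))) := by
  unfold couple
  dsimp only
  have hinner : ∀ (x : Int) (rs : PySem.Set String),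
      (PySem.List.pyRange 0 (PySem.List.len a) 1).foldl
        (fun rs j => if x ≠ PySem.List.pyGetD a j 0 then
          PySem.Set.add rs (pvKey x (PySem.List.pyGetD a j 0)) else rs) rs
        = PySem.Set.update rs (pvInner a x) := by
    intro x rs
    rw [PySem.List.foldl_pyRange_pyGetD a (0:Int)
      (fun rs y => if x ≠ y then PySem.Set.add rs (pvKey x y) else rs) rs (by norm_num)]
    simpa using pvCondfold x a rs
  calc (PySem.List.pyRange 0 (PySem.List.len a) 1).foldl
        (fun rs i => (PySem.List.pyRange 0 (PySem.List.len a) 1).foldl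
          (fun rs j => if PySem.List.pyGetD a i 0 ≠ PySem.List.pyGetD a j 0 then
            PySem.Set.add rs (pvKey (PySem.List.pyGetD a i 0) (PySem.List.pyGetD a j 0))
          else rs) rs) PySem.Set.empty
      = (PySem.List.pyRange 0 (PySem.List.len a) 1).foldl
          (fun rs i => PySem.Set.update rs (pvInner a (PySem.List.pyGetD a i 0)))
          PySem.Set.empty :=
        PySem.List.foldl_congr_mem _ _ _ _ (fun acc i _ => hinner (PySem.List.pyGetD a i 0) acc)
    _ = (a.drop (0:Int).toNat).foldl (fun rs x => PySem.Set.update rs (pvInner a x))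
          PySem.Set.empty :=
        PySem.List.foldl_pyRange_pyGetD a (0:Int)
          (fun rs x => PySem.Set.update rs (pvInner a x)) PySem.Set.empty (by norm_num)
    _ = a.foldl (fun rs x => PySem.Set.update rs (pvInner a x)) PySem.Set.empty := by simp
    _ = PySem.Set.update PySem.Set.empty (a.flatMap (pvInner a)) :=
        pvFoldlUpdate (pvInner a) a PySem.Set.empty
    _ = PySem.Set.ofList (a.flatMap (pvInner a)) := PySem.Set.update_nil_left _
    _ = PySem.Set.ofList ((PySem.List.dedup a).flatMap (pvInner a)) := pvCore (pvInner a) a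
    _ = PySem.Set.update PySem.Set.empty ((PySem.List.dedup a).flatMap (pvInner a)) :=
        (PySem.Set.update_nil_left _).symm
    _ = (PySem.List.dedup a).foldl (fun rs x => PySem.Set.update rs (pvInner a x))
          PySem.Set.empty := (pvFoldlUpdate (pvInner a) (PySem.List.dedup a) PySem.Set.empty).symm
    _ = (PySem.List.dedup a).foldl
          (fun rs x => PySem.Set.update rs (pvInner (PySem.List.dedup a) x))
          PySem.Set.empty :=
        PySem.List.foldl_congr_mem _ _ _ _ (fun acc x _ =>
          pvUpdateCongr acc _ _ (pvCore (fun y => if x ≠ y then [pvKey x y] else []) a))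
    _ = PySem.Set.update PySem.Set.empty
          ((PySem.List.dedup a).flatMap (pvInner (PySem.List.dedup a))) :=
        pvFoldlUpdate (pvInner (PySem.List.dedup a)) (PySem.List.dedup a) PySem.Set.empty
    _ = PySem.Set.ofList ((PySem.List.dedup a).flatMap (pvInner (PySem.List.dedup a))) :=
        PySem.Set.update_nil_left _

-- B-SIDE LEMMAS ------------------------------------------------------------

theorem pvMapRange (d : List Int) : (List.range d.length).map (fun j => d.getD j 0) = d := by
  apply List.ext_getElem <;> simp
  intro i h1 h2; simp [List.getElem?_eq_getElem h2]

theorem pvInnerFilter (l : List Int) (x : Int) :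
    pvInner l x = (l.filter (fun y => decide (x ≠ y))).map (fun y => pvKey x y) := by
  induction l with
  | nil => simp [pvInner]
  | cons y t ih =>
    by_cases h : x = y <;>
      simp only [pvInner, List.flatMap_cons, List.filter_cons, h, ite_not] at ih ⊢ <;>
      simp [h, ih]

theorem pvRows (d : List Int) : ∀ i : Nat, i ≤ d.length →
    (List.range (i * d.length)).foldl
      (fun out k => if d.getD (k / d.length) 0 ≠ d.getD (k % d.length) 0 then
        out ++ [pvKey (d.getD (k / d.length) 0) (d.getD (k % d.length) 0)] else out) []
    = (d.take i).flatMap (pvInner d) := by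
  intro i
  induction i with
  | zero => simp
  | succ i ih =>
    intro hle
    have hL : 0 < d.length := Nat.lt_of_lt_of_le (Nat.succ_pos i) hle
    have hi : i < d.length := Nat.lt_of_succ_le hle
    rw [Nat.succ_mul, List.range_add, List.foldl_append, ih (Nat.le_of_lt hi)]
    have hrow : ∀ (init : List String),
        ((List.range d.length).map (fun j => i * d.length + j)).foldl
          (fun out k => if d.getD (k / d.length) 0 ≠ d.getD (k % d.length) 0 then
            out ++ [pvKey (d.getD (k / d.length) 0) (d.getD (k % d.length) 0)] else out) init
        = init ++ pvInner d (d.getD i 0) := by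
      intro init
      rw [List.foldl_map]
      have hcong : ∀ (acc : List String) (j : Nat), j ∈ List.range d.length →
          (if d.getD ((i * d.length + j) / d.length) 0 ≠ d.getD ((i * d.length + j) % d.length) 0 then
            acc ++ [pvKey (d.getD ((i * d.length + j) / d.length) 0) (d.getD ((i * d.length + j) % d.length) 0)] else acc)
          = (if d.getD i 0 ≠ d.getD j 0 then acc ++ [pvKey (d.getD i 0) (d.getD j 0)] else acc) := by
        intro acc j hj
        have hjL : j < d.length := List.mem_range.mp hj
        have heq : i * d.length + j = d.length * i + j := by ring
        have hdiv : (i * d.length + j) / d.length = i := by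
          rw [heq, Nat.mul_add_div hL]; simp [Nat.div_eq_of_lt hjL]
        have hmod : (i * d.length + j) % d.length = j := by
          rw [heq, Nat.mul_add_mod]; exact Nat.mod_eq_of_lt hjL
        rw [hdiv, hmod]
      rw [PySem.List.foldl_congr_mem _ _ _ _ hcong]
      -- now foldl append-if over range; turn into filter/map
      have hfa := PySem.List.foldl_append_if (l := List.range d.length)
        (p := fun j => decide (d.getD i 0 ≠ d.getD j 0))
        (f := fun j => pvKey (d.getD i 0) (d.getD j 0)) (acc := init)
      simp only [decide_eq_true_eq] at hfa
      rw [hfa]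
      rw [pvInnerFilter]
      congr 1
      generalize d.getD i 0 = x
      conv_rhs => rw [← pvMapRange d]
      rw [List.filter_map, List.map_map]
      rfl
    rw [hrow, List.take_add_one, List.flatMap_append]
    congr 1
    simp [List.getElem?_eq_getElem hi, List.getD_eq_getElem?_getD]

theorem pvBchar (a : List Int) :
    couple_alt a = PySem.Set.ofList
      ((PySem.List.dedup a).flatMap (pvInner (PySem.List.dedup a))) := by
  unfold couple_alt
  dsimp only
  congr 1
  have hlen : PySem.List.len (PySem.List.dedup a) = ((PySem.List.dedup a).length : Int) := by
    simp [PySem.List.len_eq]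
  rw [hlen]
  have hcast : (((PySem.List.dedup a).length : Int) * ((PySem.List.dedup a).length : Int))
      = (((PySem.List.dedup a).length * (PySem.List.dedup a).length : Nat) : Int) := by
    push_cast; ring
  rw [hcast, PySem.List.pyRange_zero_natCast, List.foldl_map]
  have hr := pvRows (PySem.List.dedup a) (PySem.List.dedup a).length (le_refl _)
  rw [List.take_length] at hr
  rw [← hr]
  apply PySem.List.foldl_congr_mem
  intro acc k hk
  rw [PySem.Int.floordiv_natCast, PySem.Int.mod_natCast,
    PySem.List.pyGetD_natCast, PySem.List.pyGetD_natCast]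

-- ===== VERDICT (by name: the statement is the Claim_ definition above) =====
theorem couple_spec : Claim_equal_couple := by
  intro a _
  unfold Spec_couple
  rw [pvAchar, pvBchar]
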